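-- pv_equiv track=rewrite | github.com/TENTA9/ThinkPRM_laptop | add_conf_sglang2.py | get_cot_prefix_before_step
-- ===== SOURCE A (Python) =====
-- def is_verification_chunk(chunk):
--     """검증 청크인지 확인 (Step k:로 시작하고 \\boxed{}로 끝나는지)"""
--     chunk = chunk.strip()
--     if not chunk.startswith("Step"):
--         return False
--     if "\\boxed{" not in chunk:
--         return False
--     return True
--
-- def get_cot_prefix_before_step(cot_chunks, step_index):
--     """
--     step_index번째 검증 청크 직전까지의 모든 내용을 반환
--     """
--     prefix_chunks = []
--     verification_count = 0
--
--     for chunk in cot_chunks: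
--         if is_verification_chunk(chunk):
--             if verification_count == step_index:
--                 break
--             verification_count += 1
--         prefix_chunks.append(chunk)
--
--     return ''.join(prefix_chunks)
-- ===== SOURCE B (Python) =====
-- def is_verification_chunk(chunk):
--     chunk = chunk.strip()
--     if not chunk.startswith("Step"):
--         return False
--     if "\\boxed{" not in chunk:
--         return False
--     return True
--
-- def get_cot_prefix_before_step(cot_chunks, step_index):
--     indices = [i for i, ch in enumerate(cot_chunks) if is_verification_chunk(ch)]
--     cutoff = indices[step_index] if 0 <= step_index < len(indices) else len(cot_chunks)
--     return ''.join(cot_chunks[:cutoff])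
-- ===== Notes on version B (the rewrite author's own statement) =====
-- stated objective: alternative
-- what changed: Replaces the accumulate-prefix-until-break loop carrying a verification counter with an index-table pass (positions of verification chunks) followed by a guarded table lookup and a single slice-and-join.
import Mathlib
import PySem

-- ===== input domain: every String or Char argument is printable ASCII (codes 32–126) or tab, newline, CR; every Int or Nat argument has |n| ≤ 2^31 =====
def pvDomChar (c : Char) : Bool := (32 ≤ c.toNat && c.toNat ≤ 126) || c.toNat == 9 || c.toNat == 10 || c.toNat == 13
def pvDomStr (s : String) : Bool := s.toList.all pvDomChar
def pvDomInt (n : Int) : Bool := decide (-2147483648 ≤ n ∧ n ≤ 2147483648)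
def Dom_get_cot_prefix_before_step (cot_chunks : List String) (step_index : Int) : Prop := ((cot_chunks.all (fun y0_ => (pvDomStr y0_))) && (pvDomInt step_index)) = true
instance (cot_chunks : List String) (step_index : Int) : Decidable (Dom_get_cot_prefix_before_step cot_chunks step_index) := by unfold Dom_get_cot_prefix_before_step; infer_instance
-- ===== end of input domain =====

-- B replaces A's accumulate-until-break loop (with a running verification counter) by an
-- index-table pass plus a single slice-and-join; same cost, different decomposition.

-- ===== PORT A =====
def is_verification_chunk (chunk : String) : Bool :=
  let c := PySem.Str.strip chunk
  if !(PySem.Str.startswith c "Step") then false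
  else if !(PySem.Str.isIn "\\boxed{" c) then false
  else true

-- A's for-loop: builds the prefix list, breaking at the step_index-th verification chunk.
def gcpLoopA (chunks : List String) (verification_count step_index : Int) : List String :=
  match chunks with
  | [] => []
  | c :: rest =>
    if is_verification_chunk c then
      if verification_count = step_index then []
      else c :: gcpLoopA rest (verification_count + 1) step_index
    else c :: gcpLoopA rest verification_count step_index

def get_cot_prefix_before_step (cot_chunks : List String) (step_index : Int) : String :=
  PySem.Str.join "" (gcpLoopA cot_chunks 0 step_index)

-- ===== PORT B =====
-- B's comprehension: [i for i, ch in enumerate(cot_chunks) if is_verification_chunk(ch)]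
def gcpIndices (chunks : List String) (i : Nat) : List Nat :=
  match chunks with
  | [] => []
  | c :: rest =>
    if is_verification_chunk c then i :: gcpIndices rest (i + 1)
    else gcpIndices rest (i + 1)

def get_cot_prefix_before_step_alt (cot_chunks : List String) (step_index : Int) : String :=
  let indices := gcpIndices cot_chunks 0
  let cutoff : Nat :=
    if 0 ≤ step_index ∧ step_index < (indices.length : Int)
    then indices[step_index.toNat]!
    else cot_chunks.length
  PySem.Str.join "" (cot_chunks.take cutoff)

-- ===== PRECONDITION & SPEC =====
def Spec_get_cot_prefix_before_step (cot_chunks : List String) (step_index : Int) (out : String) : Prop := out = get_cot_prefix_before_step_alt cot_chunks step_index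
instance (cot_chunks : List String) (step_index : Int) (out : String) : Decidable (Spec_get_cot_prefix_before_step cot_chunks step_index out) := by unfold Spec_get_cot_prefix_before_step; infer_instance

-- ===== CLAIM (what is proved, stated in full; the proofs are below) =====
def Claim_equal_get_cot_prefix_before_step : Prop := ∀ (cot_chunks : List String) (step_index : Int), Dom_get_cot_prefix_before_step cot_chunks step_index → Spec_get_cot_prefix_before_step cot_chunks step_index (get_cot_prefix_before_step cot_chunks step_index)

-- ===== LEMMAS AND PROOFS =====

-- ''.join(x :: l) = x ++ ''.join(l)
theorem gcp_joinE_cons (a : String) (l : List String) :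
    PySem.Str.join "" (a :: l) = a ++ PySem.Str.join "" l := by
  apply String.toList_inj.mp
  rw [PySem.Str.toList_join]
  cases l with
  | nil =>
      simp [PySem.Chars.join_singleton, PySem.Str.join, PySem.Chars.join_nil]
  | cons b t =>
      rw [show ("" : String).toList = ([] : List Char) from rfl, List.map_cons, List.map_cons,
        PySem.Chars.join_cons_cons]
      simp [PySem.Str.toList_join]

-- A's counter only matters through step_index - verification_count.
theorem gcpLoopA_shift (chunks : List String) (c si : Int) :
    gcpLoopA chunks c si = gcpLoopA chunks 0 (si - c) := by
  induction chunks generalizing c si with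
  | nil => rfl
  | cons x rest ih =>
      simp only [gcpLoopA]
      split_ifs with h1 h2 h3 h4 <;> try rfl
      · omega
      · omega
      · rw [ih (c + 1) si, ih (0 + 1) (si - c)]
        have : si - (c + 1) = si - c - (0 + 1) := by ring
        rw [this]
      · rw [ih c si]

theorem gcpLoopA_one (chunks : List String) (si : Int) :
    gcpLoopA chunks 1 si = gcpLoopA chunks 0 (si - 1) := gcpLoopA_shift chunks 1 si

theorem gcpIndices_shift (chunks : List String) (i : Nat) :
    gcpIndices chunks (i + 1) = (gcpIndices chunks i).map (· + 1) := by
  induction chunks generalizing i with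
  | nil => rfl
  | cons x rest ih =>
      simp only [gcpIndices]
      by_cases hv : is_verification_chunk x
      · simp [hv, ih (i + 1)]
      · simp [hv, ih (i + 1)]

theorem gcpIndices_one (chunks : List String) :
    gcpIndices chunks 1 = (gcpIndices chunks 0).map (· + 1) := gcpIndices_shift chunks 0

theorem gcp_map_add_one_getElem! (l : List Nat) (n : Nat) (h : n < l.length) :
    (l.map (· + 1))[n]! = l[n]! + 1 := by
  rw [getElem!_pos l n h, getElem!_pos (l.map (· + 1)) n (by simpa), List.getElem_map]

theorem gcp_main (chunks : List String) (si : Int) :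
    PySem.Str.join "" (gcpLoopA chunks 0 si) = get_cot_prefix_before_step_alt chunks si := by
  induction chunks generalizing si with
  | nil =>
      simp only [gcpLoopA, get_cot_prefix_before_step_alt, gcpIndices]
      simp
  | cons c rest ih =>
      simp only [gcpLoopA, get_cot_prefix_before_step_alt, gcpIndices, zero_add] at *
      by_cases hv : is_verification_chunk c
      · simp only [if_pos hv]
        by_cases h0 : (0 : Int) = si
        · -- break immediately: cutoff = 0
          rw [if_pos h0]
          have hlen : (0 : Int) ≤ si ∧ si < (((0 :: gcpIndices rest 1) : List Nat).length : Int) := by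
            constructor <;> simp [← h0]
          rw [if_pos hlen]
          have h0' : si.toNat = 0 := by omega
          simp [h0']
        · rw [if_neg h0, gcp_joinE_cons, gcpLoopA_one, ih (si - 1), gcpIndices_one]
          by_cases hin : (0 : Int) ≤ si - 1 ∧ si - 1 < (((gcpIndices rest 0) : List Nat).length : Int)
          · rw [if_pos hin]
            have hin' : (0 : Int) ≤ si ∧
                si < (((0 :: (gcpIndices rest 0).map (· + 1)) : List Nat).length : Int) := by
              simp only [List.length_cons, List.length_map]
              push_cast
              push_cast at hin
              omega
            rw [if_pos hin']
            obtain ⟨m, hm⟩ : ∃ m, si.toNat = m + 1 := ⟨si.toNat - 1, by omega⟩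
            have hm' : (si - 1).toNat = m := by omega
            rw [hm, hm', List.getElem!_cons_succ,
              gcp_map_add_one_getElem! _ m (by rw [← hm']; exact_mod_cast by omega)]
            rw [List.take_succ_cons, gcp_joinE_cons]
          · rw [if_neg hin]
            have hin' : ¬ ((0 : Int) ≤ si ∧
                si < (((0 :: (gcpIndices rest 0).map (· + 1)) : List Nat).length : Int)) := by
              simp only [List.length_cons, List.length_map]
              push_cast
              push_cast at hin
              omega
            rw [if_neg hin']
            simp [List.take_succ_cons, gcp_joinE_cons]
      · simp only [if_neg hv]
        rw [gcp_joinE_cons, ih si, gcpIndices_one]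
        by_cases hin : (0 : Int) ≤ si ∧ si < (((gcpIndices rest 0) : List Nat).length : Int)
        · have hin' : (0 : Int) ≤ si ∧
              si < ((((gcpIndices rest 0).map (· + 1)) : List Nat).length : Int) := by
            simpa using hin
          rw [if_pos hin, if_pos hin']
          have hlt : si.toNat < (gcpIndices rest 0).length := by omega
          rw [gcp_map_add_one_getElem! _ _ hlt, List.take_succ_cons, gcp_joinE_cons]
        · have hin' : ¬ ((0 : Int) ≤ si ∧
              si < ((((gcpIndices rest 0).map (· + 1)) : List Nat).length : Int)) := by
            simpa using hin
          rw [if_neg hin, if_neg hin']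
          simp [List.take_succ_cons, gcp_joinE_cons]

-- ===== VERDICT (by name: the statement is the Claim_ definition above) =====
theorem get_cot_prefix_before_step_spec : Claim_equal_get_cot_prefix_before_step := by
  intro cot_chunks step_index _
  unfold Spec_get_cot_prefix_before_step get_cot_prefix_before_step
  exact gcp_main cot_chunks step_index
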